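-- pv_equiv track=rewrite | github.com/KillyBOT/Stuy-CS-Projects | DFSMazeCreator.py | createEmptyMaze
-- ===== SOURCE A (Python) =====
-- pD = {
--       "u":0,
--       "r":1,
--       "d":2,
--       "l":3}
--
-- def createEmptyMaze(size):
--     returnMaze = []
--     for row in range(size):
--         rowToAdd = []
--         for column in range(size):
--             #False means there is no wall, true means there is one
--             toAdd = [False,False,False,False]
--             if column == 0:
--                 toAdd[pD["l"]] = None
--             elif column >= size-1:
--                 toAdd[pD["r"]] = None
--
--             if row == 0:
--                 toAdd[pD["u"]] = None
--             elif row >= size-1: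
--                 toAdd[pD["d"]] = None
--
--             rowToAdd.append(toAdd)
--         returnMaze.append(rowToAdd)
--
--     return returnMaze
-- ===== SOURCE B (Python) =====
-- def createEmptyMaze(size):
--     # Fill a uniform grid first, then patch the four boundary edges in separate passes.
--     maze = [[[False, False, False, False] for _ in range(size)] for _ in range(size)]
--     for row in maze:
--         row[0][3] = None    # left edge
--         row[-1][1] = None   # right edge
--     if maze:
--         for cell in maze[0]:
--             cell[0] = None  # top edge
--         for cell in maze[-1]:
--             cell[2] = None  # bottom edge
--     return maze
-- ===== Notes on version B (the rewrite author's own statement) =====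
-- stated objective: alternative
-- what changed: B fills a uniform grid of wall-free cells first and then patches the four boundary edges in separate staged passes (left/right per row, then top and bottom rows), instead of A's per-cell if/elif branching inside the nested construction loop.
-- intended difference: For size == 1 the single cell lies on all four boundaries: A's elif chain marks only up and left as boundary (None) leaving right/down False, while B marks all four None, which is the intended boundary marking. — e.g. on createEmptyMaze(1): A returns [[[none, some false, some false, none]]], B returns [[[none, none, none, none]]]
import Mathlib
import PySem

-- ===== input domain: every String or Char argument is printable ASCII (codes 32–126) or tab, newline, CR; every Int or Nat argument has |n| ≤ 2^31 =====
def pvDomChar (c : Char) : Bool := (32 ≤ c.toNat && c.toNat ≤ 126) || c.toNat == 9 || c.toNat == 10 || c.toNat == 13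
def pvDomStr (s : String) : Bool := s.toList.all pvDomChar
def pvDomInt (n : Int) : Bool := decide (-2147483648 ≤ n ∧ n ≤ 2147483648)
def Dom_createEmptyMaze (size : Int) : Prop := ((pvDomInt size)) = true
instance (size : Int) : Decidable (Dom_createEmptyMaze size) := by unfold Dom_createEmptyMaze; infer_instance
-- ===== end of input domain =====

-- B fills a uniform grid first and patches the four boundary edges in separate staged
-- passes, instead of A's per-cell if/elif branching inside the construction loop
-- (objective: alternative decomposition; intended difference at size == 1).


-- ===== PORT A =====
def createEmptyMaze (size : Int) : List (List (List (Option Bool))) :=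
  (PySem.List.pyRange 0 size 1).foldl (fun returnMaze row =>
    returnMaze ++ [(PySem.List.pyRange 0 size 1).foldl (fun rowToAdd column =>
      let toAdd : List (Option Bool) := [some false, some false, some false, some false]
      let toAdd := if column = 0 then toAdd.set 3 none
        else if column ≥ size - 1 then toAdd.set 1 none else toAdd
      let toAdd := if row = 0 then toAdd.set 0 none
        else if row ≥ size - 1 then toAdd.set 2 none else toAdd
      rowToAdd ++ [toAdd]) []]) []

-- ===== PORT B =====
-- Source B mutates rows/cells in place; each in-place assignment is ported as List.set on
-- the corresponding position (row[-1] / maze[-1] is the last element, index length-1;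
-- the accesses are guarded exactly as in Source B, so List.getD never hits its default).
def createEmptyMaze_alt (size : Int) : List (List (List (Option Bool))) :=
  let maze := (PySem.List.pyRange 0 size 1).map (fun _ =>
    (PySem.List.pyRange 0 size 1).map (fun _ =>
      ([some false, some false, some false, some false] : List (Option Bool))))
  let maze := maze.map (fun row =>
    let row := row.set 0 ((row.getD 0 []).set 3 none)
    row.set (row.length - 1) ((row.getD (row.length - 1) []).set 1 none))
  if maze.isEmpty then maze else
    let maze := maze.set 0 ((maze.getD 0 []).map (fun cell => cell.set 0 none))
    maze.set (maze.length - 1) ((maze.getD (maze.length - 1) []).map (fun cell => cell.set 2 none))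

-- ===== PRECONDITION & SPEC =====
-- For size == 1 the single cell lies on all four boundaries: A's elif chain marks only
-- up and left as boundary (None) leaving right/down False, while B marks all four None,
-- which is the intended boundary marking.
def D_createEmptyMaze (size : Int) : Prop := size = 1
instance (size : Int) : Decidable (D_createEmptyMaze size) := by unfold D_createEmptyMaze; infer_instance
def Spec_createEmptyMaze (size : Int) (out : List (List (List (Option Bool)))) : Prop :=
  ¬ D_createEmptyMaze size → out = createEmptyMaze_alt size
instance (size : Int) (out : List (List (List (Option Bool)))) : Decidable (Spec_createEmptyMaze size out) := by
  unfold Spec_createEmptyMaze; infer_instance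
def pvDiffWitness_createEmptyMaze : Int := 1
def pvDiffWitnessOut_createEmptyMaze :
    (List (List (List (Option Bool)))) × (List (List (List (Option Bool)))) :=
  ([[[none, some false, some false, none]]], [[[none, none, none, none]]])

-- ===== CLAIM =====
def Claim_unchanged_createEmptyMaze : Prop :=
  ∀ (size : Int), Dom_createEmptyMaze size → Spec_createEmptyMaze size (createEmptyMaze size)
def Claim_changed_createEmptyMaze : Prop :=
  Dom_createEmptyMaze (pvDiffWitness_createEmptyMaze) ∧
  D_createEmptyMaze (pvDiffWitness_createEmptyMaze) ∧
  createEmptyMaze (pvDiffWitness_createEmptyMaze) = pvDiffWitnessOut_createEmptyMaze.1 ∧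
  createEmptyMaze_alt (pvDiffWitness_createEmptyMaze) = pvDiffWitnessOut_createEmptyMaze.2 ∧
  pvDiffWitnessOut_createEmptyMaze.1 ≠ pvDiffWitnessOut_createEmptyMaze.2
def Claim_exact_createEmptyMaze : Prop :=
  ∀ (size : Int), Dom_createEmptyMaze size → D_createEmptyMaze size →
    createEmptyMaze size ≠ createEmptyMaze_alt size

-- ===== LEMMAS AND PROOFS =====

-- canonical closed form of one cell (valid when 2 ≤ size and r, c < size.toNat)
def pvCell (size : Int) (r c : Nat) : List (Option Bool) :=
  [if r = 0 then none else some false,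
   if c = size.toNat - 1 then none else some false,
   if r = size.toNat - 1 then none else some false,
   if c = 0 then none else some false]

theorem pyRange_to_range (size : Int) :
    PySem.List.pyRange 0 size 1 = (List.range size.toNat).map (fun k : Nat => (k : Int)) := by
  rw [PySem.List.pyRange_one]
  simp only [Int.sub_zero]
  apply List.map_congr_left
  intro k _
  omega

-- an append-accumulator fold is a map
theorem foldl_push {α β : Type} (l : List α) (f : α → β) (acc : List β) :
    l.foldl (fun a x => a ++ [f x]) acc = acc ++ l.map f := by
  induction l generalizing acc with
  | nil => simp
  | cons x xs ih => simp [List.foldl, ih]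

-- patching the first and last entry of a map over range is a map with edge conditionals
theorem set_first_last {α : Type} (n : Nat) (hn : 1 ≤ n) (f : Nat → α) (x y : α) :
    (((List.range n).map f).set 0 x).set (n - 1) y
      = (List.range n).map (fun k => if k = n - 1 then y else if k = 0 then x else f k) := by
  apply List.ext_getElem
  · simp
  · intro k h1 h2
    simp only [List.length_set, List.length_map, List.length_range] at h1
    simp only [List.getElem_set, List.getElem_map, List.getElem_range]
    split_ifs <;> first | rfl | omega

theorem A_canon (size : Int) (h : 2 ≤ size) :
    createEmptyMaze size =
      (List.range size.toNat).map (fun r =>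
        (List.range size.toNat).map (fun c => pvCell size r c)) := by
  rw [createEmptyMaze, foldl_push, List.nil_append, pyRange_to_range]
  simp only [List.map_map, Function.comp_def]
  apply List.map_congr_left
  intro r hr
  rw [foldl_push, List.nil_append]
  simp only [List.map_map, Function.comp_def]
  apply List.map_congr_left
  intro c hc
  rw [List.mem_range] at hr hc
  dsimp only [pvCell]
  split_ifs <;> first | rfl | omega

theorem getD_map_range_const {α : Type} (n : Nat) (hn : 1 ≤ n) (g : Nat → α) (d : α) :
    ((List.range n).map g).getD 0 d = g 0 := by
  rw [List.getD_eq_getElem _ _ (by simp; omega)]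
  simp

theorem getD_set0_map_range {α : Type} (n : Nat) (hn2 : 2 ≤ n) (g : Nat → α) (x d : α) :
    (((List.range n).map g).set 0 x).getD (n - 1) d = g (n - 1) := by
  rw [List.getD_eq_getElem _ _ (by simp; omega)]
  rw [List.getElem_set]
  rw [if_neg (by omega)]
  simp

theorem B_canon (size : Int) (h : 2 ≤ size) :
    createEmptyMaze_alt size =
      (List.range size.toNat).map (fun r =>
        (List.range size.toNat).map (fun c => pvCell size r c)) := by
  have hn : 1 ≤ size.toNat := by omega
  have hn2 : 2 ≤ size.toNat := by omega
  simp only [createEmptyMaze_alt, pyRange_to_range, List.map_map, Function.comp_def]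
  simp only [List.length_set, List.length_map, List.length_range]
  simp only [getD_map_range_const size.toNat hn]
  simp only [List.set_cons_succ, List.set_cons_zero]
  simp only [getD_set0_map_range size.toNat hn2]
  simp only [List.set_cons_succ, List.set_cons_zero]
  simp only [set_first_last size.toNat hn]
  split_ifs with hE
  · exfalso
    rw [List.isEmpty_iff] at hE
    simp only [List.map_eq_nil_iff, List.range_eq_nil] at hE
    omega
  apply List.map_congr_left
  intro r hr
  rw [List.mem_range] at hr
  split_ifs with h1 h2
  · rw [List.map_map]
    apply List.map_congr_left
    intro c hc
    rw [List.mem_range] at hc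
    simp only [Function.comp_def, pvCell]
    split_ifs <;> first | rfl | omega
  · rw [List.map_map]
    apply List.map_congr_left
    intro c hc
    rw [List.mem_range] at hc
    simp only [Function.comp_def, pvCell]
    split_ifs <;> first | rfl | omega
  · apply List.map_congr_left
    intro c hc
    rw [List.mem_range] at hc
    dsimp only [pvCell]
    split_ifs <;> first | rfl | omega

theorem nil_case (size : Int) (h : size ≤ 0) :
    createEmptyMaze size = createEmptyMaze_alt size := by
  have : PySem.List.pyRange 0 size 1 = [] := PySem.List.pyRange_one_eq_nil (by omega)
  simp [createEmptyMaze, createEmptyMaze_alt, this]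

-- ===== VERDICT =====
theorem createEmptyMaze_spec : Claim_unchanged_createEmptyMaze := by
  intro size _ hD
  by_cases h0 : size ≤ 0
  · exact (nil_case size h0).symm ▸ rfl
  · have h2 : 2 ≤ size := by
      rcases lt_or_ge size 2 with h | h
      · exfalso; apply hD; unfold D_createEmptyMaze; omega
      · exact h
    show createEmptyMaze size = createEmptyMaze_alt size
    rw [A_canon size h2, B_canon size h2]

theorem createEmptyMaze_changed : Claim_changed_createEmptyMaze := by
  unfold Claim_changed_createEmptyMaze; decide

theorem createEmptyMaze_tight : Claim_exact_createEmptyMaze := by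
  intro size _ hD
  unfold D_createEmptyMaze at hD
  subst hD
  decide
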